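-- pv_equiv track=rewrite | github.com/rajakarthik-genai/backendtest | src/agents/crew_agents/vector_embedding_agent.py | _create_structured_summaries
-- ===== SOURCE A (Python) =====
-- from typing import Dict, Any, List, Optional
--
-- def _create_structured_summaries(clinical_data: Dict[str, Any]) -> Dict[str, str]:
--     """Create summaries of structured data for embedding."""
--     summaries = {}
--
--     # Injuries summary
--     injuries = clinical_data.get("injuries", [])
--     if injuries:
--         injury_texts = []
--         for injury in injuries:
--             injury_text = f"Injury: {injury.get('description', 'Unknown')} affecting {injury.get('body_part', 'unknown body part')} with {injury.get('severity', 'unknown')} severity"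
--             if injury.get('date') != "Not Available":
--                 injury_text += f" on {injury.get('date')}"
--             injury_texts.append(injury_text)
--         summaries["injuries_summary"] = ". ".join(injury_texts)
--
--     # Diagnoses summary
--     diagnoses = clinical_data.get("diagnoses", [])
--     if diagnoses:
--         diagnosis_texts = []
--         for diagnosis in diagnoses:
--             diag_text = f"Diagnosis: {diagnosis.get('name', 'Unknown')}"
--             if diagnosis.get('code') != "Not Available":
--                 diag_text += f" (Code: {diagnosis.get('code')})"
--             if diagnosis.get('date_diagnosed') != "Not Available":
--                 diag_text += f" diagnosed on {diagnosis.get('date_diagnosed')}"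
--             diagnosis_texts.append(diag_text)
--         summaries["diagnoses_summary"] = ". ".join(diagnosis_texts)
--
--     # Procedures summary
--     procedures = clinical_data.get("procedures", [])
--     if procedures:
--         procedure_texts = []
--         for procedure in procedures:
--             proc_text = f"Procedure: {procedure.get('name', 'Unknown')}"
--             if procedure.get('date') != "Not Available":
--                 proc_text += f" performed on {procedure.get('date')}"
--             if procedure.get('outcome') != "Not Available":
--                 proc_text += f" with outcome: {procedure.get('outcome')}"
--             procedure_texts.append(proc_text)
--         summaries["procedures_summary"] = ". ".join(procedure_texts)
--
--     # Medications summary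
--     medications = clinical_data.get("medications", [])
--     if medications:
--         med_texts = []
--         for medication in medications:
--             med_text = f"Medication: {medication.get('name', 'Unknown')}"
--             if medication.get('dosage') != "Not Available":
--                 med_text += f" {medication.get('dosage')}"
--             if medication.get('frequency') != "Not Available":
--                 med_text += f" {medication.get('frequency')}"
--             med_texts.append(med_text)
--         summaries["medications_summary"] = ". ".join(med_texts)
--
--     # Timeline summary
--     timeline = clinical_data.get("timeline", [])
--     if timeline:
--         timeline_texts = []
--         for event in timeline:
--             timeline_text = f"Event on {event.get('date', 'unknown date')}: {event.get('event', 'Unknown event')}"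
--             timeline_texts.append(timeline_text)
--         summaries["timeline_summary"] = ". ".join(timeline_texts)
--
--     return summaries
-- ===== SOURCE B (Python) =====
-- # Data-driven re-implementation: one generic engine over a table of
-- # (output_key, source_key, base_fn, optional_fields) specs.
--
-- def _base_injury(i):
--     return f"Injury: {i.get('description', 'Unknown')} affecting {i.get('body_part', 'unknown body part')} with {i.get('severity', 'unknown')} severity"
--
-- def _base_diagnosis(d):
--     return f"Diagnosis: {d.get('name', 'Unknown')}"
--
-- def _base_procedure(p):
--     return f"Procedure: {p.get('name', 'Unknown')}"
--
-- def _base_medication(m):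
--     return f"Medication: {m.get('name', 'Unknown')}"
--
-- def _base_event(e):
--     return f"Event on {e.get('date', 'unknown date')}: {e.get('event', 'Unknown event')}"
--
-- _SPECS = [
--     ("injuries_summary", "injuries", _base_injury,
--      [("date", " on ", "")]),
--     ("diagnoses_summary", "diagnoses", _base_diagnosis,
--      [("code", " (Code: ", ")"), ("date_diagnosed", " diagnosed on ", "")]),
--     ("procedures_summary", "procedures", _base_procedure,
--      [("date", " performed on ", ""), ("outcome", " with outcome: ", "")]),
--     ("medications_summary", "medications", _base_medication,
--      [("dosage", " ", ""), ("frequency", " ", "")]),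
--     ("timeline_summary", "timeline", _base_event,
--      []),
-- ]
--
-- def _item_text(base, opts, item):
--     text = base(item)
--     for field, pre, post in opts:
--         v = item.get(field)
--         if v != "Not Available":
--             text += pre + str(v) + post
--     return text
--
-- def _create_structured_summaries(clinical_data):
--     out = {}
--     for out_key, src_key, base, opts in _SPECS:
--         items = clinical_data.get(src_key, [])
--         if items:
--             out[out_key] = ". ".join(_item_text(base, opts, it) for it in items)
--     return out
-- ===== Notes on version B (the rewrite author's own statement) =====
-- stated objective: simpler
-- what changed: Replaces the five copy-pasted per-category blocks with one generic engine driven by a spec table of (output_key, source_key, base_fn, optional suffix fields), so a single loop handles every category.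
import Mathlib
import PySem

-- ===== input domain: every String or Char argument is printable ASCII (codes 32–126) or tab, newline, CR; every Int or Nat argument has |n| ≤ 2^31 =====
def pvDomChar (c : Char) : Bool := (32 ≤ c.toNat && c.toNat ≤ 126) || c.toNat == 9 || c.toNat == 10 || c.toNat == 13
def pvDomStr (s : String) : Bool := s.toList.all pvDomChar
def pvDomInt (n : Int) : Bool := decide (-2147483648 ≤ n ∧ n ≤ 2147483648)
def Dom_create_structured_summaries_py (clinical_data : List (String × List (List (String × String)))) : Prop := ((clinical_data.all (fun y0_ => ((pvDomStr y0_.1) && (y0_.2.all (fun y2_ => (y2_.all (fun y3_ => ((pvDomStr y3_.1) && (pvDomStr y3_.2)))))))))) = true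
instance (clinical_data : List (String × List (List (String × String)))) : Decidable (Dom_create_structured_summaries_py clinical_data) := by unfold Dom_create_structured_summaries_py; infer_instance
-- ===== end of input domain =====

-- B replaces A's five copy-pasted per-category blocks with one generic loop over a spec table;
-- output strings are identical, objective: simpler.

-- shared f-string semantics: Python str() of an Optional[str] ('None' when the key is absent)
def pyShowOpt : Option String → String
  | some s => s
  | none   => "None"

-- ===== PORT A =====
def create_structured_summaries_py (clinical_data : List (String × List (List (String × String)))) : List (String × String) :=
  let cd := PySem.Dict.mk clinical_data
  let summaries : PySem.Dict String String := PySem.Dict.mk []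
  -- Injuries summary
  let injuries := cd.getD "injuries" []
  let summaries :=
    if injuries ≠ [] then
      let injury_texts := injuries.foldl (fun acc injury =>
        let i := PySem.Dict.mk injury
        let t := "Injury: " ++ i.getD "description" "Unknown" ++ " affecting " ++ i.getD "body_part" "unknown body part" ++ " with " ++ i.getD "severity" "unknown" ++ " severity"
        let t := if i.get? "date" ≠ some "Not Available" then t ++ " on " ++ pyShowOpt (i.get? "date") else t
        acc ++ [t]) []
      summaries.insert "injuries_summary" (PySem.Str.join ". " injury_texts)
    else summaries
  -- Diagnoses summary
  let diagnoses := cd.getD "diagnoses" []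
  let summaries :=
    if diagnoses ≠ [] then
      let diagnosis_texts := diagnoses.foldl (fun acc diagnosis =>
        let d := PySem.Dict.mk diagnosis
        let t := "Diagnosis: " ++ d.getD "name" "Unknown"
        let t := if d.get? "code" ≠ some "Not Available" then t ++ " (Code: " ++ pyShowOpt (d.get? "code") ++ ")" else t
        let t := if d.get? "date_diagnosed" ≠ some "Not Available" then t ++ " diagnosed on " ++ pyShowOpt (d.get? "date_diagnosed") else t
        acc ++ [t]) []
      summaries.insert "diagnoses_summary" (PySem.Str.join ". " diagnosis_texts)
    else summaries
  -- Procedures summary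
  let procedures := cd.getD "procedures" []
  let summaries :=
    if procedures ≠ [] then
      let procedure_texts := procedures.foldl (fun acc procedure =>
        let p := PySem.Dict.mk procedure
        let t := "Procedure: " ++ p.getD "name" "Unknown"
        let t := if p.get? "date" ≠ some "Not Available" then t ++ " performed on " ++ pyShowOpt (p.get? "date") else t
        let t := if p.get? "outcome" ≠ some "Not Available" then t ++ " with outcome: " ++ pyShowOpt (p.get? "outcome") else t
        acc ++ [t]) []
      summaries.insert "procedures_summary" (PySem.Str.join ". " procedure_texts)
    else summaries
  -- Medications summary
  let medications := cd.getD "medications" []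
  let summaries :=
    if medications ≠ [] then
      let med_texts := medications.foldl (fun acc medication =>
        let m := PySem.Dict.mk medication
        let t := "Medication: " ++ m.getD "name" "Unknown"
        let t := if m.get? "dosage" ≠ some "Not Available" then t ++ " " ++ pyShowOpt (m.get? "dosage") else t
        let t := if m.get? "frequency" ≠ some "Not Available" then t ++ " " ++ pyShowOpt (m.get? "frequency") else t
        acc ++ [t]) []
      summaries.insert "medications_summary" (PySem.Str.join ". " med_texts)
    else summaries
  -- Timeline summary
  let timeline := cd.getD "timeline" []
  let summaries :=
    if timeline ≠ [] then
      let timeline_texts := timeline.foldl (fun acc event =>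
        let e := PySem.Dict.mk event
        let t := "Event on " ++ e.getD "date" "unknown date" ++ ": " ++ e.getD "event" "Unknown event"
        acc ++ [t]) []
      summaries.insert "timeline_summary" (PySem.Str.join ". " timeline_texts)
    else summaries
  summaries.items

-- ===== PORT B =====
def pvBaseInjury (it : List (String × String)) : String :=
  let i := PySem.Dict.mk it
  "Injury: " ++ i.getD "description" "Unknown" ++ " affecting " ++ i.getD "body_part" "unknown body part" ++ " with " ++ i.getD "severity" "unknown" ++ " severity"

def pvBaseDiagnosis (it : List (String × String)) : String :=
  "Diagnosis: " ++ (PySem.Dict.mk it).getD "name" "Unknown"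

def pvBaseProcedure (it : List (String × String)) : String :=
  "Procedure: " ++ (PySem.Dict.mk it).getD "name" "Unknown"

def pvBaseMedication (it : List (String × String)) : String :=
  "Medication: " ++ (PySem.Dict.mk it).getD "name" "Unknown"

def pvBaseEvent (it : List (String × String)) : String :=
  let e := PySem.Dict.mk it
  "Event on " ++ e.getD "date" "unknown date" ++ ": " ++ e.getD "event" "Unknown event"

-- the spec table: (output_key, source_key, base sentence fn, optional (field, prefix, suffix) list)
def pvSpecs : List (String × String × (List (String × String) → String) × List (String × String × String)) :=
  [ ("injuries_summary", "injuries", pvBaseInjury, [("date", " on ", "")]),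
    ("diagnoses_summary", "diagnoses", pvBaseDiagnosis, [("code", " (Code: ", ")"), ("date_diagnosed", " diagnosed on ", "")]),
    ("procedures_summary", "procedures", pvBaseProcedure, [("date", " performed on ", ""), ("outcome", " with outcome: ", "")]),
    ("medications_summary", "medications", pvBaseMedication, [("dosage", " ", ""), ("frequency", " ", "")]),
    ("timeline_summary", "timeline", pvBaseEvent, []) ]

def pvItemText (base : List (String × String) → String) (opts : List (String × String × String))
    (item : List (String × String)) : String :=
  opts.foldl (fun text o =>
    let v := (PySem.Dict.mk item).get? o.1
    if v ≠ some "Not Available" then text ++ o.2.1 ++ pyShowOpt v ++ o.2.2 else text) (base item)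

def create_structured_summaries_py_alt (clinical_data : List (String × List (List (String × String)))) : List (String × String) :=
  (pvSpecs.foldl (fun out spec =>
    let items := (PySem.Dict.mk clinical_data).getD spec.2.1 []
    if items ≠ [] then
      out.insert spec.1 (PySem.Str.join ". " (items.map (pvItemText spec.2.2.1 spec.2.2.2)))
    else out) (PySem.Dict.mk [])).items

-- ===== PRECONDITION & SPEC =====
def Spec_create_structured_summaries_py (clinical_data : List (String × List (List (String × String)))) (out : List (String × String)) : Prop := out = create_structured_summaries_py_alt clinical_data
instance (clinical_data : List (String × List (List (String × String)))) (out : List (String × String)) : Decidable (Spec_create_structured_summaries_py clinical_data out) := by unfold Spec_create_structured_summaries_py; infer_instance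

-- ===== CLAIM (what is proved, stated in full; the proofs are below) =====
def Claim_equal_create_structured_summaries_py : Prop := ∀ (clinical_data : List (String × List (List (String × String)))), Dom_create_structured_summaries_py clinical_data → Spec_create_structured_summaries_py clinical_data (create_structured_summaries_py clinical_data)

-- ===== LEMMAS AND PROOFS =====

theorem pv_foldl_push {α β : Type} (f : α → β) (xs : List α) (acc : List β) :
    xs.foldl (fun a x => a ++ [f x]) acc = acc ++ xs.map f := by
  induction xs generalizing acc with
  | nil => simp
  | cons x xs ih => simp [List.foldl, ih]

theorem pv_inj_eq (it : List (String × String)) :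
    (let i := PySem.Dict.mk it
     let t := "Injury: " ++ i.getD "description" "Unknown" ++ " affecting " ++ i.getD "body_part" "unknown body part" ++ " with " ++ i.getD "severity" "unknown" ++ " severity"
     if i.get? "date" ≠ some "Not Available" then t ++ " on " ++ pyShowOpt (i.get? "date") else t)
    = pvItemText pvBaseInjury [("date", " on ", "")] it := by
  simp only [pvItemText, pvBaseInjury, List.foldl]
  split <;> simp

theorem pv_diag_eq (it : List (String × String)) :
    (let d := PySem.Dict.mk it
     let t := "Diagnosis: " ++ d.getD "name" "Unknown"
     let t := if d.get? "code" ≠ some "Not Available" then t ++ " (Code: " ++ pyShowOpt (d.get? "code") ++ ")" else t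
     if d.get? "date_diagnosed" ≠ some "Not Available" then t ++ " diagnosed on " ++ pyShowOpt (d.get? "date_diagnosed") else t)
    = pvItemText pvBaseDiagnosis [("code", " (Code: ", ")"), ("date_diagnosed", " diagnosed on ", "")] it := by
  simp only [pvItemText, pvBaseDiagnosis, List.foldl]
  split <;> split <;> simp

theorem pv_proc_eq (it : List (String × String)) :
    (let p := PySem.Dict.mk it
     let t := "Procedure: " ++ p.getD "name" "Unknown"
     let t := if p.get? "date" ≠ some "Not Available" then t ++ " performed on " ++ pyShowOpt (p.get? "date") else t
     if p.get? "outcome" ≠ some "Not Available" then t ++ " with outcome: " ++ pyShowOpt (p.get? "outcome") else t)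
    = pvItemText pvBaseProcedure [("date", " performed on ", ""), ("outcome", " with outcome: ", "")] it := by
  simp only [pvItemText, pvBaseProcedure, List.foldl]
  split <;> split <;> simp

theorem pv_med_eq (it : List (String × String)) :
    (let m := PySem.Dict.mk it
     let t := "Medication: " ++ m.getD "name" "Unknown"
     let t := if m.get? "dosage" ≠ some "Not Available" then t ++ " " ++ pyShowOpt (m.get? "dosage") else t
     if m.get? "frequency" ≠ some "Not Available" then t ++ " " ++ pyShowOpt (m.get? "frequency") else t)
    = pvItemText pvBaseMedication [("dosage", " ", ""), ("frequency", " ", "")] it := by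
  simp only [pvItemText, pvBaseMedication, List.foldl]
  split <;> split <;> simp

theorem pv_evt_eq (it : List (String × String)) :
    (let e := PySem.Dict.mk it
     "Event on " ++ e.getD "date" "unknown date" ++ ": " ++ e.getD "event" "Unknown event")
    = pvItemText pvBaseEvent [] it := by
  simp [pvItemText, pvBaseEvent]

-- ===== VERDICT (by name: the statement is the Claim_ definition above) =====
theorem create_structured_summaries_py_spec : Claim_equal_create_structured_summaries_py := by
  intro cd _
  unfold Spec_create_structured_summaries_py create_structured_summaries_py create_structured_summaries_py_alt
  simp only [pvSpecs, List.foldl, pv_foldl_push, List.nil_append,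
    pv_inj_eq, pv_diag_eq, pv_proc_eq, pv_med_eq, pv_evt_eq]
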